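-- pv_equiv track=rewrite | github.com/Exx-0D/AES-CBC---Non-fini | vigenere.py | subdivision
-- ===== SOURCE A (Python) =====
-- def subdivision (string, n):
--     """
--     Subdivise le texte en n blocs. Soit x = numéro du bloc - 1, tout les blocs contiennent les caractères aux indices x + n*r pour r un entier positif.
--     Retourne une liste contenant n blocs.
--     """
--     blocs = ['' for x in range(n)]
--     for x in range (n):
--         r = 0
--         while x + n * r < len(string):
--             blocs[x] += string[x + n * r]
--             r += 1
--     return blocs
-- ===== SOURCE B (Python) =====
-- def subdivision(string, n):
--     """
--     Subdivise le texte en n blocs en un seul passage: le caractere d'indice i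
--     va dans le bloc i % n. Retourne une liste contenant n blocs.
--     """
--     blocs = ['' for x in range(n)]
--     if n > 0:
--         for i, ch in enumerate(string):
--             blocs[i % n] += ch
--     return blocs
-- ===== Notes on version B (the rewrite author's own statement) =====
-- stated objective: simpler
-- what changed: A collects each block separately with a nested block/stride loop (for each x in range(n), a while walking x, x+n, x+2n, ...); B makes one linear pass over the string via enumerate, appending character i to block i % n, filling all blocks simultaneously.
import Mathlib
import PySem

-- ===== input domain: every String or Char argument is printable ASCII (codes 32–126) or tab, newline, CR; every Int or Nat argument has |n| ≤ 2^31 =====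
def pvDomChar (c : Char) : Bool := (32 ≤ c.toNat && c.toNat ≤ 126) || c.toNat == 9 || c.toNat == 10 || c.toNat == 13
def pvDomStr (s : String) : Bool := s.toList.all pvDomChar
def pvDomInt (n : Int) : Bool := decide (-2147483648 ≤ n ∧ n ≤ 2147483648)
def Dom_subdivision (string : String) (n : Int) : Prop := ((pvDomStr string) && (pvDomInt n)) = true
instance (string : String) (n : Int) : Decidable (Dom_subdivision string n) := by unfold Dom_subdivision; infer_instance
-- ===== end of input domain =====

-- B replaces A's nested block-by-block stride loops by one linear pass that sends
-- character i to block i % n (objective: simpler, one pass in source order).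

-- ===== PORT A =====
-- Inner 'while x + n * r < len(string)' loop of A; the loop state is (blocs, r).
-- The '0 < n' conjunct of the guard only makes the recursion total: Python reaches
-- this loop solely with x drawn from range(n), hence n ≥ 1 there.  On an
-- out-of-range index (unreachable: 0 ≤ x + n*r < len(string) at every call) the
-- fetched character defaults to the empty string.
def subdivisionWhile (string : String) (n x : Int) (blocs : List String) (r : Int) : List String :=
  if h : x + n * r < PySem.Str.len string ∧ 0 < n then
    subdivisionWhile string n x
      (PySem.List.pySetD blocs x
        (PySem.List.pyGetD blocs x "" ++
          ((PySem.Str.pyGet? string (x + n * r)).map String.singleton).getD ""))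
      (r + 1)
  else blocs
termination_by (PySem.Str.len string - (x + n * r)).toNat
decreasing_by
  have hm : n * (r + 1) = n * r + n := by ring
  simp only [PySem.Str.len_eq] at *
  omega

def subdivision (string : String) (n : Int) : List String :=
  let blocs := (PySem.List.pyRange 0 n 1).map (fun _ => "")
  (PySem.List.pyRange 0 n 1).foldl (fun b x => subdivisionWhile string n x b 0) blocs

-- ===== PORT B =====
def subdivision_alt (string : String) (n : Int) : List String :=
  let blocs := (PySem.List.pyRange 0 n 1).map (fun _ => "")
  if 0 < n then
    (PySem.List.enumerate string.toList 0).foldl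
      (fun b p =>
        PySem.List.pySetD b (PySem.Int.mod p.1 n)
          (PySem.List.pyGetD b (PySem.Int.mod p.1 n) "" ++ String.singleton p.2))
      blocs
  else blocs

-- ===== PRECONDITION & SPEC =====
def Spec_subdivision (string : String) (n : Int) (out : List String) : Prop := out = subdivision_alt string n
instance (string : String) (n : Int) (out : List String) : Decidable (Spec_subdivision string n out) := by unfold Spec_subdivision; infer_instance

-- ===== CLAIM (what is proved, stated in full; the proofs are below) =====
def Claim_equal_subdivision : Prop := ∀ (string : String) (n : Int), Dom_subdivision string n → Spec_subdivision string n (subdivision string n)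

-- ===== LEMMAS AND PROOFS =====

-- The characters of cs (read with global indices starting at k) whose global
-- index is ≡ x (mod n'), in source order: the common shape of both ports' blocks.
def pvSelB (n' x : Nat) : Nat → List Char → List Char
  | _, [] => []
  | k, c :: cs => if k % n' = x then c :: pvSelB n' x (k + 1) cs else pvSelB n' x (k + 1) cs

lemma pvSelB_nil_of_ge (n' x k : Nat) (cs : List Char) (h : cs.length ≤ k) :
    pvSelB n' x k (cs.drop k) = [] := by
  rw [List.drop_eq_nil_iff.mpr h]
  rfl

lemma pvSelB_skip (n' x : Nat) (cs : List Char) :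
    ∀ (t k : Nat), (∀ u, u < t → (k + u) % n' ≠ x) →
      pvSelB n' x k (cs.drop k) = pvSelB n' x (k + t) (cs.drop (k + t)) := by
  intro t
  induction t with
  | zero => intro k _; simp
  | succ t ih =>
    intro k hu
    by_cases hk : k < cs.length
    · rw [List.drop_eq_getElem_cons hk]
      have h0 : ¬ (k % n' = x) := by simpa using hu 0 (by omega)
      rw [pvSelB, if_neg h0]
      have hrest := ih (k + 1) (fun u hu' => by
        have := hu (u + 1) (by omega)
        simpa [Nat.add_assoc, Nat.add_comm 1 u] using this)
      rw [hrest]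
      have he : k + 1 + t = k + (t + 1) := by omega
      rw [he]
    · rw [pvSelB_nil_of_ge n' x k cs (by omega), pvSelB_nil_of_ge n' x (k + (t+1)) cs (by omega)]

lemma pvSelB_step (n' x j : Nat) (cs : List Char) (hpos : 0 < n')
    (hj : j < cs.length) (hx : j % n' = x) :
    pvSelB n' x j (cs.drop j) = cs[j] :: pvSelB n' x (j + n') (cs.drop (j + n')) := by
  rw [List.drop_eq_getElem_cons hj, pvSelB, if_pos hx]
  congr 1
  have hside : ∀ u, u < n' - 1 → (j + 1 + u) % n' ≠ x := by
    intro u hu heq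
    have hmodeq : j % n' = (j + 1 + u) % n' := hx.trans heq.symm
    have hdvd : n' ∣ (j + 1 + u) - j := (Nat.modEq_iff_dvd' (by omega)).mp hmodeq
    have : n' ≤ (j + 1 + u) - j := Nat.le_of_dvd (by omega) hdvd
    omega
  have hs := pvSelB_skip n' x cs (n' - 1) (j + 1) hside
  have he : j + 1 + (n' - 1) = j + n' := by omega
  rw [he] at hs
  exact hs

-- ----- B side -----

lemma pvFoldB_len (n : Int) :
    ∀ (ps : List (Int × Char)) (blocs : List String),
      (ps.foldl (fun b p =>
        PySem.List.pySetD b (PySem.Int.mod p.1 n)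
          (PySem.List.pyGetD b (PySem.Int.mod p.1 n) "" ++ String.singleton p.2)) blocs).length
      = blocs.length := by
  intro ps
  induction ps with
  | nil => intro blocs; rfl
  | cons p ps ih =>
    intro blocs
    rw [List.foldl_cons, ih, PySem.List.length_pySetD]

lemma pvFoldB_getD (n : Int) (n' : Nat) (hn : n = (n' : Int)) (hpos : 0 < n') :
    ∀ (cs : List Char) (k : Nat) (blocs : List String), blocs.length = n' →
      ∀ x : Nat, x < n' →
      ((PySem.List.enumerate cs (k : Int)).foldl (fun b p =>
        PySem.List.pySetD b (PySem.Int.mod p.1 n)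
          (PySem.List.pyGetD b (PySem.Int.mod p.1 n) "" ++ String.singleton p.2)) blocs).getD x ""
      = blocs.getD x "" ++ String.ofList (pvSelB n' x k cs) := by
  intro cs
  induction cs with
  | nil =>
    intro k blocs hb x hx
    simp [PySem.List.enumerate_nil, pvSelB]
  | cons c cs ih =>
    intro k blocs hb x hx
    rw [PySem.List.enumerate_cons, List.foldl_cons]
    have hcast : (k : Int) + 1 = ((k + 1 : Nat) : Int) := by push_cast; ring
    have hmod : PySem.Int.mod (k : Int) n = ((k % n' : Nat) : Int) := by
      rw [hn]; exact PySem.Int.mod_natCast k n'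
    rw [hcast]
    simp only [hmod, PySem.List.pySetD_natCast, PySem.List.pyGetD_natCast]
    have hm : k % n' < n' := Nat.mod_lt _ hpos
    rw [ih (k + 1) _ (by rw [List.length_set]; exact hb) x hx]
    by_cases hxm : k % n' = x
    · subst hxm
      rw [List.getD_eq_getElem?_getD, List.getElem?_set_self (by omega), Option.getD_some]
      apply String.toList_inj.mp
      simp [pvSelB]
    · rw [List.getD_eq_getElem?_getD, List.getElem?_set_ne hxm, ← List.getD_eq_getElem?_getD]
      simp [pvSelB, hxm]

-- ----- A side -----

lemma pvWhile_stop (string : String) (n' xn rn : Nat) (blocs : List String)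
    (hge : string.toList.length ≤ xn + n' * rn) (hx : xn < blocs.length) :
    subdivisionWhile string (n' : Int) (xn : Int) blocs (rn : Int)
      = blocs.set xn (blocs.getD xn "" ++
          String.ofList (pvSelB n' xn (xn + n' * rn) (string.toList.drop (xn + n' * rn)))) := by
  rw [subdivisionWhile]
  have hguard : ¬ (((xn : Int) + (n' : Int) * (rn : Int) < PySem.Str.len string) ∧ (0 : Int) < (n' : Int)) := by
    simp only [PySem.Str.len_eq]
    omega
  rw [dif_neg hguard, pvSelB_nil_of_ge n' xn _ _ hge]
  have hgd : blocs.getD xn "" = blocs[xn] := by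
    rw [List.getD_eq_getElem?_getD, List.getElem?_eq_getElem hx, Option.getD_some]
  rw [hgd]
  simp [List.set_getElem_self]

lemma pvWhile (string : String) (n' : Nat) (hpos : 0 < n') :
    ∀ (m xn rn : Nat) (blocs : List String), xn < n' →
      string.toList.length ≤ xn + n' * rn + m → xn < blocs.length →
      subdivisionWhile string (n' : Int) (xn : Int) blocs (rn : Int)
        = blocs.set xn (blocs.getD xn "" ++
            String.ofList (pvSelB n' xn (xn + n' * rn) (string.toList.drop (xn + n' * rn)))) := by
  intro m
  induction m with
  | zero =>
    intro xn rn blocs _ hL hx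
    exact pvWhile_stop string n' xn rn blocs (by omega) hx
  | succ m ih =>
    intro xn rn blocs hxn hL hx
    by_cases hlt : xn + n' * rn < string.toList.length
    · rw [subdivisionWhile]
      have hguard : (((xn : Int) + (n' : Int) * (rn : Int) < PySem.Str.len string) ∧ (0 : Int) < (n' : Int)) := by
        simp only [PySem.Str.len_eq]
        omega
      rw [dif_pos hguard]
      have hcastj : (xn : Int) + (n' : Int) * (rn : Int) = ((xn + n' * rn : Nat) : Int) := by
        push_cast; ring
      have hchar : PySem.Str.pyGet? string ((xn + n' * rn : Nat) : Int)
          = some (string.toList[xn + n' * rn]'hlt) := by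
        rw [PySem.Str.pyGet?_natCast, List.getElem?_eq_getElem hlt]
      have hr1 : (rn : Int) + 1 = ((rn + 1 : Nat) : Int) := by push_cast; ring
      rw [hcastj, hchar, hr1]
      simp only [Option.map_some, Option.getD_some, PySem.List.pySetD_natCast,
        PySem.List.pyGetD_natCast]
      have harith : string.toList.length ≤ xn + n' * (rn + 1) + m := by
        have h2 : n' * (rn + 1) = n' * rn + n' := by ring
        omega
      rw [ih xn (rn + 1) _ hxn harith (by rw [List.length_set]; exact hx)]
      rw [List.set_set]
      have hgm : ∀ v : String, (blocs.set xn v).getD xn "" = v := by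
        intro v
        rw [List.getD_eq_getElem?_getD, List.getElem?_set_self hx, Option.getD_some]
      rw [hgm]
      have hidx : xn + n' * (rn + 1) = (xn + n' * rn) + n' := by ring
      rw [hidx]
      have hmodj : (xn + n' * rn) % n' = xn := by
        rw [Nat.add_mul_mod_self_left, Nat.mod_eq_of_lt hxn]
      rw [pvSelB_step n' xn (xn + n' * rn) string.toList hpos hlt hmodj]
      congr 1
      apply String.toList_inj.mp
      simp
    · exact pvWhile_stop string n' xn rn blocs (by omega) hx

lemma pvFoldA (string : String) (n' : Nat) (hpos : 0 < n') :
    ∀ (k : Nat) (blocs : List String), k ≤ n' → blocs.length = n' →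
      (((PySem.List.pyRange 0 (k : Int) 1).foldl
          (fun b x => subdivisionWhile string (n' : Int) x b 0) blocs).length = n')
      ∧ ∀ x : Nat, x < n' →
        ((PySem.List.pyRange 0 (k : Int) 1).foldl
          (fun b x => subdivisionWhile string (n' : Int) x b 0) blocs).getD x ""
        = if x < k then blocs.getD x "" ++ String.ofList (pvSelB n' x x (string.toList.drop x))
          else blocs.getD x "" := by
  intro k
  induction k with
  | zero =>
    intro blocs _ hb
    rw [PySem.List.pyRange_one_eq_nil (by norm_num)]
    exact ⟨hb, by intro x _; simp⟩
  | succ k ih =>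
    intro blocs hk hb
    have hsplit : PySem.List.pyRange 0 ((k + 1 : Nat) : Int) 1
        = PySem.List.pyRange 0 (k : Int) 1 ++ [(k : Int)] := by
      push_cast
      exact PySem.List.pyRange_one_succ_right (by positivity)
    rw [hsplit, List.foldl_append, List.foldl_cons, List.foldl_nil]
    obtain ⟨ihlen, ihgd⟩ := ih blocs (by omega) hb
    have hw := pvWhile string n' hpos string.toList.length k 0
      ((PySem.List.pyRange 0 (k : Int) 1).foldl
          (fun b x => subdivisionWhile string (n' : Int) x b 0) blocs)
      (by omega) (by omega) (by omega)
    simp only [Nat.cast_zero, Nat.mul_zero, Nat.add_zero] at hw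
    rw [hw]
    constructor
    · rw [List.length_set, ihlen]
    · intro x hx
      by_cases hxk : x = k
      · subst hxk
        rw [List.getD_eq_getElem?_getD, List.getElem?_set_self (by omega), Option.getD_some]
        rw [ihgd x hx, if_neg (by omega), if_pos (by omega)]
      · rw [List.getD_eq_getElem?_getD, List.getElem?_set_ne (by omega),
          ← List.getD_eq_getElem?_getD, ihgd x hx]
        by_cases hlt : x < k
        · rw [if_pos hlt, if_pos (by omega)]
        · rw [if_neg hlt, if_neg (by omega)]

-- ===== VERDICT (by name: the statement is the Claim_ definition above) =====
theorem subdivision_spec : Claim_equal_subdivision := by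
  intro string n _
  unfold Spec_subdivision subdivision subdivision_alt
  by_cases hn : 0 < n
  · have hn' : n = (n.toNat : Int) := (Int.toNat_of_nonneg (le_of_lt hn)).symm
    set n' := n.toNat with hdef
    have hpos : 0 < n' := by omega
    rw [hn', if_pos (by exact_mod_cast hpos)]
    dsimp only
    have hblen : ((PySem.List.pyRange 0 (n' : Int) 1).map (fun _ => ("" : String))).length = n' := by
      rw [List.length_map, PySem.List.length_pyRange_one]
      omega
    have hbgd : ∀ x : Nat, ((PySem.List.pyRange 0 (n' : Int) 1).map (fun _ => ("" : String))).getD x "" = "" := by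
      intro x
      rw [List.getD_eq_getElem?_getD, List.getElem?_map]
      cases (PySem.List.pyRange 0 (n' : Int) 1)[x]? <;> simp
    obtain ⟨halen, hagd⟩ := pvFoldA string n' hpos n'
      ((PySem.List.pyRange 0 (n' : Int) 1).map (fun _ => "")) (le_refl n') hblen
    have hgetD : ∀ (l : List String) (i : Nat) (h : i < l.length), l[i] = l.getD i "" :=
      fun l i h => by rw [List.getD_eq_getElem?_getD, List.getElem?_eq_getElem h, Option.getD_some]
    have hblenB := pvFoldB_len ((n' : Nat) : Int) (PySem.List.enumerate string.toList 0)
      ((PySem.List.pyRange 0 (n' : Int) 1).map (fun _ => ""))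
    apply List.ext_getElem (by rw [halen, hblenB, hblen])
    intro i h1 h2
    have hi : i < n' := halen ▸ h1
    rw [hgetD _ i h1, hgetD _ i h2, hagd i hi, if_pos hi]
    have hB := pvFoldB_getD ((n' : Nat) : Int) n' rfl hpos string.toList 0
      ((PySem.List.pyRange 0 (n' : Int) 1).map (fun _ => "")) hblen i hi
    simp only [Nat.cast_zero] at hB
    rw [hB, hbgd i]
    have hskip := pvSelB_skip n' i string.toList i 0
      (fun u hu => by rw [Nat.zero_add, Nat.mod_eq_of_lt (by omega)]; omega)
    simp only [List.drop_zero, Nat.zero_add] at hskip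
    rw [hskip]
  · have hnil : PySem.List.pyRange 0 n 1 = [] := PySem.List.pyRange_one_eq_nil (by omega)
    rw [if_neg hn, hnil]
    rfl
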